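-- pv_equiv track=rewrite | github.com/CaioLennonDEV/Wis-python | utils.py | organizar_por_topicos
-- ===== SOURCE A (Python) =====
-- from typing import List, Dict
--
-- def organizar_por_topicos(segmentos: List[Dict]) -> Dict[str, List[Dict]]:
--     """Organiza segmentos por tópicos"""
--     organizado = {}
--
--     for seg in segmentos:
--         topico = seg.get('topico', 'Geral')
--         if topico not in organizado:
--             organizado[topico] = []
--         organizado[topico].append(seg)
--
--     return organizado
-- ===== SOURCE B (Python) =====
-- def organizar_por_topicos(segmentos):
--     """Organiza segmentos por tópicos"""
--     resultado = {}
--     restantes = segmentos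
--     while restantes:
--         topico = restantes[0].get('topico', 'Geral')
--         resultado[topico] = [s for s in restantes if s.get('topico', 'Geral') == topico]
--         restantes = [s for s in restantes if s.get('topico', 'Geral') != topico]
--     return resultado
-- ===== Notes on version B (the rewrite author's own statement) =====
-- stated objective: alternative
-- what changed: Replaces the incremental dict bucketing (membership test + per-key append) with an iterative partition: repeatedly take the first remaining segment's topic, emit all segments with that topic in one comprehension, and continue on the rest.
import Mathlib
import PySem

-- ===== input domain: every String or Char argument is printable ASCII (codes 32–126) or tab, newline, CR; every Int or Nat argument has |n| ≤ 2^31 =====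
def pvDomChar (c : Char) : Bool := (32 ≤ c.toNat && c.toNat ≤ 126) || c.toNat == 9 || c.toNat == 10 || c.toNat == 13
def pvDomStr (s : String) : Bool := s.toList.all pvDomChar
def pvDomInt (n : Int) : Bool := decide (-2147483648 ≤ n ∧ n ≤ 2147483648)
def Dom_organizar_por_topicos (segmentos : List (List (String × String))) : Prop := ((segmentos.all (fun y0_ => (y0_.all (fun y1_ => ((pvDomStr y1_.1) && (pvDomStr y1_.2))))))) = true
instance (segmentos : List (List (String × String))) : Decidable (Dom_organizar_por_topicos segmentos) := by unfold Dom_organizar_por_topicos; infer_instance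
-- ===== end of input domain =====

-- B replaces A's incremental dict bucketing with an iterative partition by the first remaining
-- topic (same result, same key order); alternative decomposition, not claimed faster.


-- ===== PORT A =====
-- seg.get('topico', 'Geral')
def pvTopico (seg : List (String × String)) : String :=
  PySem.Dict.getD (PySem.Dict.mk seg) "topico" "Geral"

-- the body of A's for-loop: membership test, insert empty bucket, append
def pvStepA (org : List (String × List (List (String × String)))) (seg : List (String × String)) :
    List (String × List (List (String × String))) :=
  let topico := pvTopico seg
  let org' := if org.any (fun p => p.1 == topico) then org else org ++ [(topico, [])]
  org'.map (fun p => if p.1 == topico then (p.1, p.2 ++ [seg]) else p)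

def organizar_por_topicos (segmentos : List (List (String × String))) : List (String × List (List (String × String))) :=
  segmentos.foldl pvStepA []

-- ===== PORT B =====
-- while restantes: take first topic, emit its group, keep the rest
def organizar_por_topicos_alt (segmentos : List (List (String × String))) : List (String × List (List (String × String))) :=
  match segmentos with
  | [] => []
  | seg :: rest =>
    let topico := pvTopico seg
    (topico, (seg :: rest).filter (fun s => pvTopico s == topico)) ::
      organizar_por_topicos_alt ((seg :: rest).filter (fun s => pvTopico s != topico))
termination_by segmentos.length
decreasing_by
  simp only [List.filter_cons, bne_self_eq_false]
  exact Nat.lt_succ_of_le (List.length_filter_le _ _)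

-- ===== PRECONDITION & SPEC =====
def Spec_organizar_por_topicos (segmentos : List (List (String × String))) (out : List (String × List (List (String × String)))) : Prop := out = organizar_por_topicos_alt segmentos
instance (segmentos : List (List (String × String))) (out : List (String × List (List (String × String)))) : Decidable (Spec_organizar_por_topicos segmentos out) := by unfold Spec_organizar_por_topicos; infer_instance

-- ===== CLAIM (what is proved, stated in full; the proofs are below) =====
def Claim_equal_organizar_por_topicos : Prop := ∀ (segmentos : List (List (String × String))), Dom_organizar_por_topicos segmentos → Spec_organizar_por_topicos segmentos (organizar_por_topicos segmentos)

-- ===== LEMMAS AND PROOFS =====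

-- main invariant of A's fold, for an arbitrary accumulator
theorem pv_fold_inv (segs : List (List (String × String)))
    (d : List (String × List (List (String × String)))) :
    segs.foldl pvStepA d =
      d.map (fun p => (p.1, p.2 ++ segs.filter (fun s => pvTopico s == p.1)))
      ++ organizar_por_topicos_alt
           (segs.filter (fun s => !(d.any (fun p => p.1 == pvTopico s)))) := by
  induction segs generalizing d with
  | nil => simp [organizar_por_topicos_alt]
  | cons seg rest ih =>
    simp only [List.foldl_cons]
    by_cases hc : d.any (fun p => p.1 == pvTopico seg) = true
    · have hstep : pvStepA d seg =
          d.map (fun p => if p.1 == pvTopico seg then (p.1, p.2 ++ [seg]) else p) := by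
        simp [pvStepA, hc]
      rw [hstep, ih]
      congr 1
      · rw [List.map_map]
        apply List.map_congr_left
        intro p _
        by_cases h : p.1 = pvTopico seg
        · simp [h]
        · simp [h, Ne.symm h, beq_iff_eq]
      · congr 1
        rw [List.filter_cons]
        simp only [hc, Bool.not_true]
        apply List.filter_congr
        intro s _
        rw [List.any_map]
        have hfun : ((fun p => p.1 == pvTopico s) ∘ fun (p : String × List (List (String × String))) => if (p.1 == pvTopico seg) = true then (p.1, p.2 ++ [seg]) else p) = (fun (p : String × List (List (String × String))) => p.1 == pvTopico s) := by
          funext p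
          by_cases h : p.1 = pvTopico seg <;> simp [h]
        rw [hfun]
    · have hc' : ∀ p ∈ d, (p.1 == pvTopico seg) = false := by
        intro p hp
        by_contra h
        exact hc (List.any_eq_true.mpr ⟨p, hp, by simpa using h⟩)
      have hstep : pvStepA d seg = d ++ [(pvTopico seg, [seg])] := by
        simp only [pvStepA]
        rw [if_neg hc, List.map_append]
        congr 1
        · conv_rhs => rw [← List.map_id d]
          apply List.map_congr_left
          intro p hp
          simp [hc' p hp]
        · simp
      rw [hstep, ih]
      rw [List.map_append]
      rw [List.append_assoc]
      congr 1
      · apply List.map_congr_left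
        intro p hp
        have h2 := hc' p hp
        simp only [List.filter_cons]
        rw [if_neg (by simp only [beq_iff_eq] at h2 ⊢; simp [Ne.symm (by simpa using h2)])]
      · have halt : organizar_por_topicos_alt ((seg :: rest).filter (fun s => !(d.any (fun p => p.1 == pvTopico s)))) =
            (pvTopico seg, seg :: (rest.filter (fun s => !(d.any (fun p => p.1 == pvTopico s)))).filter (fun s => pvTopico s == pvTopico seg)) ::
            organizar_por_topicos_alt ((rest.filter (fun s => !(d.any (fun p => p.1 == pvTopico s)))).filter (fun s => pvTopico s != pvTopico seg)) := by
          rw [List.filter_cons]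
          rw [if_pos (by simp [hc])]
          rw [organizar_por_topicos_alt]
          simp
        rw [halt]
        simp only [List.map_cons, List.map_nil, List.filter_filter, List.cons_append, List.nil_append]
        congr 1
        · congr 2
          apply List.filter_congr
          intro s _
          by_cases h : pvTopico s = pvTopico seg
          · have hd : d.any (fun p => p.1 == pvTopico seg) = false :=
              Bool.eq_false_iff.mpr hc
            simp [h, hd]
          · simp [h]
        · congr 1
          apply List.filter_congr
          intro s _
          simp only [List.any_append]
          by_cases h : pvTopico s = pvTopico seg
          · have hd : d.any (fun p => p.1 == pvTopico seg) = false :=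
              Bool.eq_false_iff.mpr hc
            rw [h]
            simp [hd]
          · have h1 : (pvTopico seg == pvTopico s) = false := by
              simp [Ne.symm h]
            have h2 : (pvTopico s != pvTopico seg) = true := by
              simp [bne_iff_ne, h]
            simp [h1, h2]

-- ===== VERDICT (by name: the statement is the Claim_ definition above) =====
theorem organizar_por_topicos_spec : Claim_equal_organizar_por_topicos := by
  intro segs _
  unfold Spec_organizar_por_topicos organizar_por_topicos
  rw [pv_fold_inv]
  simp
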